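-- pv_equiv track=rewrite | github.com/christianmw24/PyGasTRGI18 | trgi-fb1-1_beta.py | getgsdp
-- ===== SOURCE A (Python) =====
-- gs0 = 0
--
-- gs25 = {10: 10, 12: 15, 14: 20, 15: 25, 17: 30, 18: 35, 19: 40, 20: 45, 21: 50}
--
-- gs4 = {17: 10, 20: 15, 23: 20, 25: 25, 27: 30, 29: 35, 31: 40, 33: 45, 34: 50}
--
-- gs6 = {25: 10, 30: 15, 34: 20, 38: 25, 41: 30, 44: 35, 47: 40, 50: 45, 51: 50}
--
-- gs10 = {43: 10, 50: 15, 57: 20, 63: 25, 69: 30, 74: 35, 79: 40, 83: 45, 86: 50}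
--
-- gs16 = {68: 10, 81: 15, 92: 20, 102: 25, 110: 30, 119: 35, 126: 40, 134: 45, 138: 50}
--
-- def getgsdp(selectqnb):
--     selectqnb = int(selectqnb)
--     if selectqnb <= 17:
--         gstab = gs25
--     elif 17 < selectqnb < 28:
--         gstab = gs4
--     elif 27 < selectqnb < 42:
--         gstab = gs6
--     elif 41 < selectqnb < 69:
--         gstab = gs10
--     elif 68 < selectqnb < 111:
--         gstab = gs16
--     else:
--         gstab = gs0
--     if gstab == 0:
--         gsdp = 0
--     else:
--         if selectqnb in gstab:
--             gsdp = gstab[selectqnb]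
--         else:
--             while selectqnb not in gstab:
--                 selectqnb = selectqnb + 1
--             gsdp = gstab[selectqnb]
--     return gsdp
-- ===== SOURCE B (Python) =====
-- gs0 = 0
--
-- gs25 = {10: 10, 12: 15, 14: 20, 15: 25, 17: 30, 18: 35, 19: 40, 20: 45, 21: 50}
--
-- gs4 = {17: 10, 20: 15, 23: 20, 25: 25, 27: 30, 29: 35, 31: 40, 33: 45, 34: 50}
--
-- gs6 = {25: 10, 30: 15, 34: 20, 38: 25, 41: 30, 44: 35, 47: 40, 50: 45, 51: 50}
--
-- gs10 = {43: 10, 50: 15, 57: 20, 63: 25, 69: 30, 74: 35, 79: 40, 83: 45, 86: 50}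
--
-- gs16 = {68: 10, 81: 15, 92: 20, 102: 25, 110: 30, 119: 35, 126: 40, 134: 45, 138: 50}
--
--
-- def _bisect_left(keys, x):
--     # hand-written bisect_left (A's module imports nothing, so no bisect import)
--     lo, hi = 0, len(keys)
--     while lo < hi:
--         mid = (lo + hi) // 2
--         if keys[mid] < x:
--             lo = mid + 1
--         else:
--             hi = mid
--     return lo
--
--
-- def getgsdp(selectqnb):
--     selectqnb = int(selectqnb)
--     if selectqnb <= 17:
--         gstab = gs25
--     elif selectqnb < 28:
--         gstab = gs4
--     elif selectqnb < 42:
--         gstab = gs6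
--     elif selectqnb < 69:
--         gstab = gs10
--     elif selectqnb < 111:
--         gstab = gs16
--     else:
--         return 0
--     keys = sorted(gstab)
--     return gstab[keys[_bisect_left(keys, selectqnb)]]
-- ===== Notes on version B (the rewrite author's own statement) =====
-- stated objective: alternative
-- what changed: The ceiling-key search (membership test plus a while loop incrementing selectqnb until it hits a key) is replaced by a hand-written binary search (bisect_left) over the table's sorted keys.
import Mathlib
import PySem

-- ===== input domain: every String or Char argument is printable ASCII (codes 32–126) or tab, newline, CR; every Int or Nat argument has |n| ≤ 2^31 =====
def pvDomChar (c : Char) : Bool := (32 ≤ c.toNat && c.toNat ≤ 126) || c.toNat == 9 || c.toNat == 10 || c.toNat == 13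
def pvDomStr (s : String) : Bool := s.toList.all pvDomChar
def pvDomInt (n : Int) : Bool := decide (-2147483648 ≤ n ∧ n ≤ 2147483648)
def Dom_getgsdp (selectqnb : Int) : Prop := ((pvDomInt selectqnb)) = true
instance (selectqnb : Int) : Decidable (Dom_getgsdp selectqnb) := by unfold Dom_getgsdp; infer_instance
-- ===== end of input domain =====

-- B replaces A's step-by-one while-loop ceiling search with a binary search over the
-- table's sorted keys (objective: alternative strategy, avoids the linear climb).

-- ===== PORT A =====
-- the five tables (gs0 = 0 is modelled by `none` in the selection below, since Python
-- compares the selected table against the int 0)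
def pvGs25 : PySem.Dict Int Int := PySem.Dict.ofList [(10,10),(12,15),(14,20),(15,25),(17,30),(18,35),(19,40),(20,45),(21,50)]
def pvGs4 : PySem.Dict Int Int := PySem.Dict.ofList [(17,10),(20,15),(23,20),(25,25),(27,30),(29,35),(31,40),(33,45),(34,50)]
def pvGs6 : PySem.Dict Int Int := PySem.Dict.ofList [(25,10),(30,15),(34,20),(38,25),(41,30),(44,35),(47,40),(50,45),(51,50)]
def pvGs10 : PySem.Dict Int Int := PySem.Dict.ofList [(43,10),(50,15),(57,20),(63,25),(69,30),(74,35),(79,40),(83,45),(86,50)]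
def pvGs16 : PySem.Dict Int Int := PySem.Dict.ofList [(68,10),(81,15),(92,20),(102,25),(110,30),(119,35),(126,40),(134,45),(138,50)]

-- A's `while selectqnb not in gstab: selectqnb += 1`; the fuel is only a termination
-- guard (every table the branches select has a key ≥ the branch's selectqnb, and all
-- keys are ≤ 138, so fuel (139 - s).toNat is never exhausted where the loop is reached)
def pvWhileA (d : PySem.Dict Int Int) : Nat → Int → Int
  | 0, s => s
  | n+1, s => if d.contains s then s else pvWhileA d n (s+1)

def getgsdp (selectqnb : Int) : Int :=
  let gstab : Option (PySem.Dict Int Int) :=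
    if selectqnb ≤ 17 then some pvGs25
    else if 17 < selectqnb ∧ selectqnb < 28 then some pvGs4
    else if 27 < selectqnb ∧ selectqnb < 42 then some pvGs6
    else if 41 < selectqnb ∧ selectqnb < 69 then some pvGs10
    else if 68 < selectqnb ∧ selectqnb < 111 then some pvGs16
    else none
  match gstab with
  | none => 0
  | some d =>
      if d.contains selectqnb then d.getD selectqnb 0
      else d.getD (pvWhileA d ((139 - selectqnb).toNat) selectqnb) 0

-- ===== PORT B =====
-- Source B's hand-written _bisect_left, transliterated (while lo < hi → recursion; the
-- fuel is only a termination guard: hi - lo shrinks each step, so fuel keys.length suffices)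
def pvBisectB (keys : List Int) (x : Int) : Nat → Nat → Nat → Nat
  | 0, lo, _ => lo
  | f+1, lo, hi =>
      if lo < hi then
        let mid := (lo + hi) / 2
        if PySem.List.pyGetD keys (mid : Int) 0 < x then pvBisectB keys x f (mid + 1) hi
        else pvBisectB keys x f lo mid
      else lo

-- Source B's `keys = sorted(gstab); return gstab[keys[_bisect_left(keys, selectqnb)]]`
def pvLookupB (d : PySem.Dict Int Int) (x : Int) : Int :=
  let keys := PySem.List.sorted d.keys (fun k => k) false
  d.getD (PySem.List.pyGetD keys ((pvBisectB keys x keys.length 0 keys.length : Nat) : Int) 0) 0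

def getgsdp_alt (selectqnb : Int) : Int :=
  if selectqnb ≤ 17 then pvLookupB pvGs25 selectqnb
  else if selectqnb < 28 then pvLookupB pvGs4 selectqnb
  else if selectqnb < 42 then pvLookupB pvGs6 selectqnb
  else if selectqnb < 69 then pvLookupB pvGs10 selectqnb
  else if selectqnb < 111 then pvLookupB pvGs16 selectqnb
  else 0

-- ===== PRECONDITION & SPEC =====
def Spec_getgsdp (selectqnb : Int) (out : Int) : Prop := out = getgsdp_alt selectqnb
instance (selectqnb : Int) (out : Int) : Decidable (Spec_getgsdp selectqnb out) := by unfold Spec_getgsdp; infer_instance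

-- ===== CLAIM (what is proved, stated in full; the proofs are below) =====
def Claim_equal_getgsdp : Prop := ∀ (selectqnb : Int), Dom_getgsdp selectqnb → Spec_getgsdp selectqnb (getgsdp selectqnb)

-- ===== LEMMAS AND PROOFS =====

-- keys of gs25 are 10,12,…,21: no key below 10
theorem gs25_not_contains_low (s : Int) (hs : s < 10) : pvGs25.contains s = false := by
  simp only [PySem.Dict.contains, List.any_eq_false, beq_iff_eq, Prod.forall]
  rw [show pvGs25.items = [(10,10),(12,15),(14,20),(15,25),(17,30),(18,35),(19,40),(20,45),(21,50)] from rfl]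
  rintro a b hmem
  simp only [List.mem_cons, List.not_mem_nil, or_false] at hmem
  rcases hmem with h1|h1|h1|h1|h1|h1|h1|h1|h1 <;> (injection h1 with h1 h2; omega)

-- below the smallest key 10 of gs25, A's while loop climbs to 10
theorem pvWhileA_gs25_low (fuel : Nat) : ∀ s : Int, s ≤ 10 → (10 - s).toNat < fuel →
    pvWhileA pvGs25 fuel s = 10 := by
  induction fuel with
  | zero => intro s _ h; omega
  | succ n ih =>
      intro s hs h
      by_cases h10 : s = 10
      · subst h10
        have hc : pvGs25.contains 10 = true := by decide
        simp [pvWhileA, hc]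
      · have hc := gs25_not_contains_low s (by omega)
        simp only [pvWhileA, hc, Bool.false_eq_true, if_false]
        exact ih (s + 1) (by omega) (by omega)

-- below 10, B's binary search over gs25's sorted keys lands on index 0
theorem pvBisectB_gs25_low (s : Int) (hs : s ≤ 10) :
    pvBisectB [10,12,14,15,17,18,19,20,21] s 9 0 9 = 0 := by
  simp [pvBisectB, PySem.List.pyGetD,
        show ¬((17:Int) < s) by omega, show ¬((14:Int) < s) by omega,
        show ¬((12:Int) < s) by omega, show ¬((10:Int) < s) by omega]

theorem gs25_keys_sorted : PySem.List.sorted pvGs25.keys (fun k => k) false = [10,12,14,15,17,18,19,20,21] := by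
  decide

theorem agree_low (s : Int) (hs : s < 10) : getgsdp s = getgsdp_alt s := by
  have h17 : s ≤ 17 := by omega
  have hc := gs25_not_contains_low s hs
  have hA : getgsdp s = 10 := by
    simp only [getgsdp, if_pos h17, hc, Bool.false_eq_true, if_false]
    rw [pvWhileA_gs25_low ((139 - s).toNat) s (by omega) (by omega)]
    decide
  have hB : getgsdp_alt s = 10 := by
    simp only [getgsdp_alt, if_pos h17, pvLookupB, gs25_keys_sorted]
    rw [show ([10,12,14,15,17,18,19,20,21] : List Int).length = 9 from rfl,
        pvBisectB_gs25_low s (by omega)]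
    decide
  rw [hA, hB]

-- 10 ≤ s ≤ 110: both ports checked value by value
theorem agree_mid :
    ((List.range 101).all fun n => getgsdp (10 + (n : Int)) == getgsdp_alt (10 + (n : Int))) = true := by
  decide

theorem agree_high (s : Int) (hs : 111 ≤ s) : getgsdp s = getgsdp_alt s := by
  simp only [getgsdp, getgsdp_alt,
      if_neg (show ¬ s ≤ 17 by omega),
      if_neg (show ¬ (17 < s ∧ s < 28) by omega), if_neg (show ¬ s < 28 by omega),
      if_neg (show ¬ (27 < s ∧ s < 42) by omega), if_neg (show ¬ s < 42 by omega),
      if_neg (show ¬ (41 < s ∧ s < 69) by omega), if_neg (show ¬ s < 69 by omega),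
      if_neg (show ¬ (68 < s ∧ s < 111) by omega), if_neg (show ¬ s < 111 by omega)]

-- ===== VERDICT (by name: the statement is the Claim_ definition above) =====
theorem getgsdp_spec : Claim_equal_getgsdp := by
  intro s _
  unfold Spec_getgsdp
  by_cases hlow : s < 10
  · exact agree_low s hlow
  · by_cases hhigh : 111 ≤ s
    · exact agree_high s hhigh
    · obtain ⟨n, hn, rfl⟩ : ∃ n : Nat, n < 101 ∧ s = 10 + (n : Int) :=
        ⟨(s - 10).toNat, by omega, by omega⟩
      exact beq_iff_eq.mp (List.all_eq_true.mp agree_mid n (List.mem_range.mpr hn))
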